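-- pv_equiv track=rewrite | github.com/DanielIshi/YT-to-H5P-Pipeline | src/h5p/builders/column.py | order_column_activities
-- ===== SOURCE A (Python) =====
-- from typing import Dict, Any, List
--
-- PHASE_BY_TYPE = {
--     "dialogcards": "passive",
--     "accordion": "passive",
--     "multichoice": "active",
--     "truefalse": "active",
--     "blanks": "active",
--     "dragtext": "active",
--     "summary": "reflect",
-- }
--
-- def order_column_activities(activities: List[Dict[str, Any]]) -> List[Dict[str, Any]]:
--     """
--     Alterniert Aktivitäten innerhalb einer Column: passiv -> aktiv -> passiv -> aktiv.
--     Reflektions-Elemente (summary) werden ans Ende gestellt.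
--     Reihenfolge innerhalb jeder Gruppe bleibt stabil.
--     """
--     passive = [a for a in activities if PHASE_BY_TYPE.get(a.get("content_type", "").lower()) == "passive"]
--     active = [a for a in activities if PHASE_BY_TYPE.get(a.get("content_type", "").lower()) == "active"]
--     reflect = [a for a in activities if PHASE_BY_TYPE.get(a.get("content_type", "").lower()) == "reflect"]
--     neutral = [a for a in activities if PHASE_BY_TYPE.get(a.get("content_type", "").lower()) is None]
--
--     ordered: List[Dict[str, Any]] = []
--     while passive or active:
--         if passive:
--             ordered.append(passive.pop(0))
--         if active:
--             ordered.append(active.pop(0))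
--
--     ordered.extend(passive)
--     ordered.extend(active)
--     ordered.extend(neutral)
--     ordered.extend(reflect)
--
--     return ordered
-- ===== SOURCE B (Python) =====
-- from typing import Dict, Any, List
-- from itertools import zip_longest
--
-- PHASE_BY_TYPE = {
--     "dialogcards": "passive",
--     "accordion": "passive",
--     "multichoice": "active",
--     "truefalse": "active",
--     "blanks": "active",
--     "dragtext": "active",
--     "summary": "reflect",
-- }
--
-- def order_column_activities(activities: List[Dict[str, Any]]) -> List[Dict[str, Any]]:
--     # Single pass: bucket each activity once, then interleave passive/active with zip_longest.
--     buckets = {"passive": [], "active": [], "reflect": [], None: []}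
--     for a in activities:
--         buckets[PHASE_BY_TYPE.get(a.get("content_type", "").lower())].append(a)
--     ordered = [x for pair in zip_longest(buckets["passive"], buckets["active"])
--                for x in pair if x is not None]
--     return ordered + buckets[None] + buckets["reflect"]
-- ===== Notes on version B (the rewrite author's own statement) =====
-- stated objective: alternative
-- what changed: Replaces four filter passes plus a while-loop of pop(0) calls with a single bucketing pass and a zip_longest-based interleave.
import Mathlib
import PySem

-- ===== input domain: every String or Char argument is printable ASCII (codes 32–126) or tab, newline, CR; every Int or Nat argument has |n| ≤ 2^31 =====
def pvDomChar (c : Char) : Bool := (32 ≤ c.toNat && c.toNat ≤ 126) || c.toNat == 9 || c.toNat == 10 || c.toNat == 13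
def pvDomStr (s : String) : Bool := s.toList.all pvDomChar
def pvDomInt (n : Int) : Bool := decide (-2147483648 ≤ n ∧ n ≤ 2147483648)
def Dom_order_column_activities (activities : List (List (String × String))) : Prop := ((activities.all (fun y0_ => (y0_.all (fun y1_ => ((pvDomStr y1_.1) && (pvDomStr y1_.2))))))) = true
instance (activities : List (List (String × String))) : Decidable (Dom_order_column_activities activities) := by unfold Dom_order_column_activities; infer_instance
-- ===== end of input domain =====

-- B buckets the activities in ONE pass and interleaves with a zip_longest-style
-- merge instead of A's four filter passes and pop(0) loop (alternative algorithm, no measured speed claim).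
-- Shared module-level constant PHASE_BY_TYPE and the phase-lookup expression both sources use.
def PHASE_BY_TYPE : PySem.Dict String String :=
  PySem.Dict.mk [("dialogcards", "passive"), ("accordion", "passive"),
    ("multichoice", "active"), ("truefalse", "active"), ("blanks", "active"),
    ("dragtext", "active"), ("summary", "reflect")]

-- PHASE_BY_TYPE.get(a.get("content_type", "").lower())
def pvPhase (a : List (String × String)) : Option String :=
  PySem.Dict.get? PHASE_BY_TYPE (PySem.Str.lower (PySem.Dict.getD (PySem.Dict.mk a) "content_type" ""))

-- ===== PORT A =====
-- the 'while passive or active' loop with its two 'if nonempty: append pop(0)' steps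
def pvALoop (ordered passive active : List (List (String × String))) : List (List (String × String)) :=
  match passive, active with
  | [], [] => ordered
  | p :: ps, [] => pvALoop (ordered ++ [p]) ps []
  | [], q :: qs => pvALoop (ordered ++ [q]) [] qs
  | p :: ps, q :: qs => pvALoop (ordered ++ [p] ++ [q]) ps qs
termination_by passive.length + active.length

def order_column_activities (activities : List (List (String × String))) : List (List (String × String)) :=
  let passive := activities.filter (fun a => pvPhase a == some "passive")
  let active := activities.filter (fun a => pvPhase a == some "active")
  let reflect := activities.filter (fun a => pvPhase a == some "reflect")
  let neutral := activities.filter (fun a => pvPhase a == none)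
  let ordered := pvALoop [] passive active
  -- after the loop both passive and active are empty, so the two extends of them are no-ops
  ordered ++ neutral ++ reflect

-- ===== PORT B =====
-- buckets[phase].append(a), buckets keyed passive/active/reflect/None
def pvBStep (acc : List (List (String × String)) × List (List (String × String)) × List (List (String × String)) × List (List (String × String)))
    (a : List (String × String)) :
    List (List (String × String)) × List (List (String × String)) × List (List (String × String)) × List (List (String × String)) :=
  match pvPhase a with
  | some "passive" => (acc.1 ++ [a], acc.2.1, acc.2.2.1, acc.2.2.2)
  | some "active" => (acc.1, acc.2.1 ++ [a], acc.2.2.1, acc.2.2.2)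
  | some "reflect" => (acc.1, acc.2.1, acc.2.2.1 ++ [a], acc.2.2.2)
  | _ => (acc.1, acc.2.1, acc.2.2.1, acc.2.2.2 ++ [a])

-- zip_longest over the two buckets, flattened, dropping the None padding
def pvZipLongest : List (List (String × String)) → List (List (String × String)) → List (List (String × String))
  | [], ys => ys
  | xs, [] => xs
  | x :: xs, y :: ys => x :: y :: pvZipLongest xs ys

def order_column_activities_alt (activities : List (List (String × String))) : List (List (String × String)) :=
  let buckets := activities.foldl pvBStep ([], [], [], [])
  pvZipLongest buckets.1 buckets.2.1 ++ buckets.2.2.2 ++ buckets.2.2.1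

-- ===== PRECONDITION & SPEC =====
def Spec_order_column_activities (activities : List (List (String × String))) (out : List (List (String × String))) : Prop := out = order_column_activities_alt activities
instance (activities : List (List (String × String))) (out : List (List (String × String))) : Decidable (Spec_order_column_activities activities out) := by unfold Spec_order_column_activities; infer_instance

-- ===== CLAIM (what is proved, stated in full; the proofs are below) =====
def Claim_equal_order_column_activities : Prop := ∀ (activities : List (List (String × String))), Dom_order_column_activities activities → Spec_order_column_activities activities (order_column_activities activities)

-- ===== LEMMAS AND PROOFS =====

-- the phase lookup only ever yields none / passive / active / reflect
theorem pvPhase_cases (a : List (String × String)) :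
    pvPhase a = none ∨ pvPhase a = some "passive" ∨ pvPhase a = some "active" ∨ pvPhase a = some "reflect" := by
  unfold pvPhase
  generalize PySem.Str.lower (PySem.Dict.getD (PySem.Dict.mk a) "content_type" "") = s
  simp only [PHASE_BY_TYPE, PySem.Dict.get?_mk_cons]
  split_ifs <;> simp [PySem.Dict.get?]

theorem pvBucket_spec (xs : List (List (String × String)))
    (p a r n : List (List (String × String))) :
    xs.foldl pvBStep (p, a, r, n) =
      (p ++ xs.filter (fun x => pvPhase x == some "passive"),
       a ++ xs.filter (fun x => pvPhase x == some "active"),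
       r ++ xs.filter (fun x => pvPhase x == some "reflect"),
       n ++ xs.filter (fun x => pvPhase x == none)) := by
  induction xs generalizing p a r n with
  | nil => simp
  | cons x xs ih =>
    rcases pvPhase_cases x with h | h | h | h <;>
      simp [pvBStep, h, ih]

theorem pvZipLongest_nil_right (xs : List (List (String × String))) :
    pvZipLongest xs [] = xs := by cases xs <;> rfl

theorem pvALoop_eq (passive : List (List (String × String))) :
    ∀ (active ordered : List (List (String × String))),
      pvALoop ordered passive active = ordered ++ pvZipLongest passive active := by
  induction passive with
  | nil =>
    intro active
    induction active with
    | nil => intro ordered; simp [pvALoop, pvZipLongest]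
    | cons q qs ihq => intro ordered; simp [pvALoop, pvZipLongest, ihq]
  | cons p ps ih =>
    intro active ordered
    cases active with
    | nil => simp [pvALoop, ih [], pvZipLongest_nil_right, pvZipLongest]
    | cons q qs => simp [pvALoop, ih qs, pvZipLongest]

-- ===== VERDICT (by name: the statement is the Claim_ definition above) =====
theorem order_column_activities_spec : Claim_equal_order_column_activities := by
  intro activities _
  unfold Spec_order_column_activities order_column_activities order_column_activities_alt
  rw [pvBucket_spec]
  simp [pvALoop_eq]
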